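-- pv_equiv track=rewrite | github.com/davidnir1/Counting-Fingers-With-OPENCV | Analyzer.py | points_clustered_badly
-- ===== SOURCE A (Python) =====
-- def points_clustered_badly(points):
--     """
--     Checks to see if average distance between points is lower than 10 pixels (this negates reading a single finger as
--     more than 1 point in some cases.
--     """
--     if len(points) < 2:
--         return False
--     x, y = points[0]
--     max_x, max_y, min_x, min_y = x, y, x, y
--     for x, y in points[1:]:
--         if x > max_x:
--             max_x = x
--         elif x < min_x:
--             min_x = x
--         if y > max_y:
--             max_y = y
--         elif y < min_y:
--             min_y = y
--     dx = max_x - min_x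
--     dy = max_y - min_y
--     return dx < 10 * len(points)
-- ===== SOURCE B (Python) =====
-- def points_clustered_badly(points):
--     if len(points) < 2:
--         return False
--     xs = sorted(x for x, y in points)
--     return xs[-1] - xs[0] < 10 * len(points)
-- ===== Notes on version B (the rewrite author's own statement) =====
-- stated objective: alternative
-- what changed: Sorts the x-coordinates and takes last-minus-first instead of a hand-written single pass tracking four running extrema (dropping A's dead y bounding box); correct because the endpoints of the sorted x list are exactly the x range.
import Mathlib
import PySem

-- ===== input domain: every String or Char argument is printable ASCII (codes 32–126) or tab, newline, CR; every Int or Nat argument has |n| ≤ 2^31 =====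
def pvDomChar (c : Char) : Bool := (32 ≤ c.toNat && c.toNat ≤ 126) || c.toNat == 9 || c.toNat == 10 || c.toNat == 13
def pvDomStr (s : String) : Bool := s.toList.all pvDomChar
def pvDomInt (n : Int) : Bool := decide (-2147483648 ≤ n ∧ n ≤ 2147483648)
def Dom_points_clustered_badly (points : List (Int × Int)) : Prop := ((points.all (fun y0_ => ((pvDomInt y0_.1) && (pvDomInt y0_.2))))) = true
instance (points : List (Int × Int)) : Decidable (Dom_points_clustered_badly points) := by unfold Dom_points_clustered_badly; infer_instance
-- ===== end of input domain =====

-- B sorts the x-coordinates and compares last-minus-first to the threshold, instead of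
-- A's hand-written single pass tracking four running extrema (with a dead y bounding box).

-- ===== PORT A =====
-- the for-loop over points[1:], state (max_x, max_y, min_x, min_y)
def pcbLoop (l : List (Int × Int)) (st : Int × Int × Int × Int) : Int × Int × Int × Int :=
  match l with
  | [] => st
  | (x, y) :: t =>
    let mx := st.1; let my := st.2.1; let mn := st.2.2.1; let mny := st.2.2.2
    let s1 : Int × Int := if x > mx then (x, mn) else if x < mn then (mx, x) else (mx, mn)
    let s2 : Int × Int := if y > my then (y, mny) else if y < mny then (my, y) else (my, mny)
    pcbLoop t (s1.1, s2.1, s1.2, s2.2)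

def points_clustered_badly (points : List (Int × Int)) : Bool :=
  if points.length < 2 then false
  else
    match points with
    | [] => false  -- unreachable under the guard
    | (x, y) :: rest =>
      let st := pcbLoop rest (x, y, x, y)
      let dx := st.1 - st.2.2.1
      let _dy := st.2.1 - st.2.2.2
      decide (dx < 10 * (points.length : Int))

-- ===== PORT B =====
def points_clustered_badly_alt (points : List (Int × Int)) : Bool :=
  if points.length < 2 then false
  else
    let xs := PySem.List.sorted (points.map Prod.fst) (fun x => x) false
    match PySem.List.pyGet? xs (-1), PySem.List.pyGet? xs 0 with
    | some last, some first => decide (last - first < 10 * (points.length : Int))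
    | _, _ => false  -- unreachable: xs is nonempty under the guard

-- ===== PRECONDITION & SPEC =====
def Spec_points_clustered_badly (points : List (Int × Int)) (out : Bool) : Prop := out = points_clustered_badly_alt points
instance (points : List (Int × Int)) (out : Bool) : Decidable (Spec_points_clustered_badly points out) := by unfold Spec_points_clustered_badly; infer_instance

-- ===== CLAIM (what is proved, stated in full; the proofs are below) =====
def Claim_equal_points_clustered_badly : Prop := ∀ (points : List (Int × Int)), Dom_points_clustered_badly points → Spec_points_clustered_badly points (points_clustered_badly points)

-- ===== LEMMAS AND PROOFS =====

-- A's loop state extrema equal fold max / fold min of the x's, given min ≤ max.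
theorem pcbLoop_x (l : List (Int × Int)) (mx my mn mny : Int) (h : mn ≤ mx) :
    (pcbLoop l (mx, my, mn, mny)).1 = l.foldl (fun a p => max a p.1) mx ∧
    (pcbLoop l (mx, my, mn, mny)).2.2.1 = l.foldl (fun a p => min a p.1) mn := by
  induction l generalizing mx my mn mny with
  | nil => simp [pcbLoop]
  | cons p t ih =>
    obtain ⟨x, y⟩ := p
    simp only [pcbLoop, List.foldl]
    by_cases h1 : x > mx
    · rw [if_pos h1, show max mx x = x by omega, show min mn x = mn by omega]
      split_ifs <;> exact ih _ _ _ _ (by omega)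
    · rw [if_neg h1]
      by_cases h2 : x < mn
      · rw [if_pos h2, show max mx x = mx by omega, show min mn x = x by omega]
        split_ifs <;> exact ih _ _ _ _ (by omega)
      · rw [if_neg h2, show max mx x = mx by omega, show min mn x = mn by omega]
        split_ifs <;> exact ih _ _ _ _ (by omega)

-- fold min over x::t is a member of x::t and a lower bound of it
theorem foldl_min_spec (t : List Int) (x : Int) :
    t.foldl min x ∈ x :: t ∧ ∀ y ∈ x :: t, t.foldl min x ≤ y := by
  induction t generalizing x with
  | nil => simp
  | cons a t ih =>
    obtain ⟨hm, hb⟩ := ih (min x a)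
    constructor
    · simp only [List.foldl]
      rcases List.mem_cons.mp hm with h | h
      · rcases min_choice x a with hc | hc
        · rw [h, hc]; exact List.mem_cons_self
        · rw [h, hc]; exact List.mem_cons_of_mem _ List.mem_cons_self
      · exact List.mem_cons_of_mem _ (List.mem_cons_of_mem _ h)
    · intro y hy
      rcases List.mem_cons.mp hy with h | h
      · subst h
        exact le_trans (hb _ (List.mem_cons_self)) (min_le_left _ _)
      · rcases List.mem_cons.mp h with h2 | h2
        · subst h2
          exact le_trans (hb _ (List.mem_cons_self)) (min_le_right _ _)
        · exact hb _ (List.mem_cons_of_mem _ h2)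

-- fold max over x::t is a member of x::t and an upper bound of it
theorem foldl_max_spec (t : List Int) (x : Int) :
    t.foldl max x ∈ x :: t ∧ ∀ y ∈ x :: t, y ≤ t.foldl max x := by
  induction t generalizing x with
  | nil => simp
  | cons a t ih =>
    obtain ⟨hm, hb⟩ := ih (max x a)
    constructor
    · simp only [List.foldl]
      rcases List.mem_cons.mp hm with h | h
      · rcases max_choice x a with hc | hc
        · rw [h, hc]; exact List.mem_cons_self
        · rw [h, hc]; exact List.mem_cons_of_mem _ List.mem_cons_self
      · exact List.mem_cons_of_mem _ (List.mem_cons_of_mem _ h)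
    · intro y hy
      rcases List.mem_cons.mp hy with h | h
      · subst h
        exact le_trans (le_max_left _ _) (hb _ (List.mem_cons_self))
      · rcases List.mem_cons.mp h with h2 | h2
        · subst h2
          exact le_trans (le_max_right _ _) (hb _ (List.mem_cons_self))
        · exact hb _ (List.mem_cons_of_mem _ h2)

theorem pyGet?_neg_one {α} (s : List α) (h : s ≠ []) :
    PySem.List.pyGet? s (-1) = some (s.getLast h) := by
  have hl : 1 ≤ s.length := List.length_pos_iff.mpr h
  simp [PySem.List.pyGet?, PySem.List.pyIdx?, hl, List.getLast_eq_getElem,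
    List.getElem?_eq_getElem (by omega : s.length - 1 < s.length)]

-- the head of sorted(l) is fold-min of l, its last element fold-max of l
theorem sorted_head_getLast (x : Int) (t : List Int)
    (hs : PySem.List.sorted (x :: t) (fun z => z) false ≠ []) :
    (PySem.List.sorted (x :: t) (fun z => z) false).head hs = t.foldl min x ∧
    (PySem.List.sorted (x :: t) (fun z => z) false).getLast hs = t.foldl max x := by
  have hmem : ∀ y, y ∈ PySem.List.sorted (x :: t) (fun z => z) false ↔ y ∈ x :: t :=
    fun y => PySem.List.mem_sorted _ _ _ _
  have hslen : (PySem.List.sorted (x :: t) (fun z => z) false).length = t.length + 1 := by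
    rw [PySem.List.length_sorted]; simp
  obtain ⟨hminm, hminb⟩ := foldl_min_spec t x
  obtain ⟨hmaxm, hmaxb⟩ := foldl_max_spec t x
  obtain ⟨m, tt, hcons⟩ := List.exists_cons_of_ne_nil hs
  have hhd : (PySem.List.sorted (x :: t) (fun z => z) false).head hs = m := by
    simp [hcons]
  constructor
  · have hle : ∀ y ∈ x :: t, m ≤ y := by
      intro y hy
      have := PySem.List.key_head_sorted_le (xs := x :: t) (key := fun z => z) hcons y hy
      simpa using this
    have h1 : m ≤ t.foldl min x := hle _ hminm
    have h2 : t.foldl min x ≤ m := by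
      have : m ∈ x :: t := (hmem m).mp (by rw [hcons]; exact List.mem_cons_self)
      exact hminb _ this
    omega
  · have hge : ∀ y ∈ x :: t,
        y ≤ (PySem.List.sorted (x :: t) (fun z => z) false).getLast hs := by
      intro y hy
      obtain ⟨i, hi, hyi⟩ := List.mem_iff_getElem.mp ((hmem y).mpr hy)
      have hmono := PySem.List.key_sorted_getElem_mono (xs := x :: t) (key := fun z => z)
        (p := i) (q := (PySem.List.sorted (x :: t) (fun z => z) false).length - 1)
        (by omega) (by omega)
      rw [List.getLast_eq_getElem]
      simpa [hyi] using hmono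
    have h1 : (PySem.List.sorted (x :: t) (fun z => z) false).getLast hs ≤ t.foldl max x :=
      hmaxb _ ((hmem _).mp (List.getLast_mem hs))
    have h2 : t.foldl max x ≤ (PySem.List.sorted (x :: t) (fun z => z) false).getLast hs :=
      hge _ hmaxm
    omega

theorem pyGet?_zero_head {α} (s : List α) (h : s ≠ []) :
    PySem.List.pyGet? s 0 = some (s.head h) := by
  obtain ⟨a, t, rfl⟩ := List.exists_cons_of_ne_nil h
  simp [PySem.List.pyGet?, PySem.List.pyIdx?]

-- ===== VERDICT (by name: the statement is the Claim_ definition above) =====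
theorem points_clustered_badly_spec : Claim_equal_points_clustered_badly := by
  intro points _
  unfold Spec_points_clustered_badly points_clustered_badly points_clustered_badly_alt
  match points with
  | [] => rfl
  | [p] => simp
  | (x, y) :: q :: rest =>
    have hlen : ¬ (((x, y) :: q :: rest).length < 2) := by simp
    rw [if_neg hlen, if_neg hlen]
    simp only [List.map_cons]
    have hA := pcbLoop_x (q :: rest) x y x y le_rfl
    have hs : PySem.List.sorted (x :: q.1 :: rest.map Prod.fst) (fun z => z) false ≠ [] := by
      rw [Ne, PySem.List.sorted_eq_nil_iff]; simp
    obtain ⟨hhead, hlast⟩ := sorted_head_getLast x (q.1 :: rest.map Prod.fst) hs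
    rw [pyGet?_neg_one _ hs, pyGet?_zero_head _ hs]
    simp only [hA.1, hA.2, hlast, hhead]
    rw [show (q.1 :: rest.map Prod.fst) = (q :: rest).map Prod.fst from rfl,
      List.foldl_map, List.foldl_map]
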